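-- pv_equiv track=rewrite | github.com/yasharzavary/codingQuestions | easy/کسر لتکی/solution.py | kasr_latki
-- ===== SOURCE A (Python) =====
-- def kasr_latki(n, s=1, Final_num='', mul_num=1):
--     # base statement: when we reach last one, just add number and back
--     if s == n:
--         return Final_num + str(mul_num)
--     # start new up position
--     Final_num += str(mul_num) + '+\\frac{'
--     temp = 2*mul_num  # up number
--     Final_num = kasr_latki(n, s+1, Final_num, temp)
--     Final_num += '}{'  # close up and open down
--     temp += 1  # down number
--     Final_num = kasr_latki(n, s+1, Final_num, temp)
--     Final_num += '}'  # close down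
--     return Final_num
-- ===== SOURCE B (Python) =====
-- def kasr_latki(n, s=1, Final_num='', mul_num=1):
--     # Iterative explicit-stack traversal: work items are either literal tokens
--     # (strings) or (level, multiplier) nodes; output grows left to right.
--     out = Final_num
--     stack = [(s, mul_num)]
--     while stack:
--         top = stack.pop()
--         if isinstance(top, str):
--             out += top
--         else:
--             d, mul = top
--             if d == n:
--                 out += str(mul)
--             else:
--                 out += str(mul) + '+\\frac{'
--                 stack.append('}')
--                 stack.append((d + 1, 2 * mul + 1))
--                 stack.append('}{')
--                 stack.append((d + 1, 2 * mul))
--     return out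
-- ===== Notes on version B (the rewrite author's own statement) =====
-- stated objective: alternative
-- what changed: Replaced the accumulator-threading double recursion with a non-recursive stack machine: a while loop pops work items (literal tokens or (level, multiplier) nodes) from an explicit stack and appends each fragment to the output string.
import Mathlib
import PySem

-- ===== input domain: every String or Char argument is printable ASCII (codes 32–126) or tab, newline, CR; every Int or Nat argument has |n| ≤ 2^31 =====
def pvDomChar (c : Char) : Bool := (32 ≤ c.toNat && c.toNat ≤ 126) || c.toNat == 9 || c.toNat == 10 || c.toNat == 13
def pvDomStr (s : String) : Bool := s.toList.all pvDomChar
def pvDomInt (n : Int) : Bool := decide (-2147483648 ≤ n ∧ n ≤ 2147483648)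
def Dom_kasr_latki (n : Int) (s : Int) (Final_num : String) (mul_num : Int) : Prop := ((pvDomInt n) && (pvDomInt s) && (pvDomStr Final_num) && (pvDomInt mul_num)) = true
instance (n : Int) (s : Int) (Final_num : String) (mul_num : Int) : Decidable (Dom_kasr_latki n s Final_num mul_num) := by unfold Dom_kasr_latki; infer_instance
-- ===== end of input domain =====

-- B replaces the accumulator-threading recursion with an iterative explicit-stack traversal
-- (a while loop popping literal tokens / (level, multiplier) nodes); same output, no recursion.
-- When s > n the Python recursion (A) / loop (B) never terminates (RecursionError / hang),
-- so Pre_ requires s ≤ n; both ports use fuel that is exact on Pre_.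

-- ===== PORT A =====
-- accumulator-threading recursion, step for step as in Source A; fuel (n - s).toNat is exact when s ≤ n
def kasrLoopA (n : Int) : Nat → Int → String → Int → String
  | fuel, s, Final_num, mul_num =>
    if s = n then Final_num ++ PySem.Int.toStr mul_num
    else match fuel with
      | 0 => Final_num  -- unreachable under Pre_ (Python raises RecursionError)
      | fuel + 1 =>
        let F1 := Final_num ++ PySem.Int.toStr mul_num ++ "+\\frac{"
        let temp := 2 * mul_num
        let F2 := kasrLoopA n fuel (s + 1) F1 temp
        let F3 := F2 ++ "}{"
        let F4 := kasrLoopA n fuel (s + 1) F3 (temp + 1)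
        F4 ++ "}"

def kasr_latki (n : Int) (s : Int) (Final_num : String) (mul_num : Int) : String :=
  kasrLoopA n (n - s).toNat s Final_num mul_num

-- ===== PORT B =====
-- stack machine: work items are literal tokens (inl) or (level, multiplier) nodes (inr);
-- one fuel unit per loop iteration; fuel 2^((n-s).toNat + 2) is sufficient on Pre_.
def kasrRun (n : Int) : Nat → List (String ⊕ Int × Int) → String → String
  | 0, _, out => out                 -- fuel exhausted: unreachable under Pre_
  | _ + 1, [], out => out
  | fuel + 1, Sum.inl t :: stack, out => kasrRun n fuel stack (out ++ t)
  | fuel + 1, Sum.inr (d, mul) :: stack, out =>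
    if d = n then kasrRun n fuel stack (out ++ PySem.Int.toStr mul)
    else kasrRun n fuel
      (Sum.inr (d + 1, 2 * mul) :: Sum.inl "}{" :: Sum.inr (d + 1, 2 * mul + 1) :: Sum.inl "}" :: stack)
      (out ++ PySem.Int.toStr mul ++ "+\\frac{")

def kasr_latki_alt (n : Int) (s : Int) (Final_num : String) (mul_num : Int) : String :=
  kasrRun n (2 ^ ((n - s).toNat + 2)) [Sum.inr (s, mul_num)] Final_num

-- ===== PRECONDITION & SPEC =====
-- Pre_ excludes s > n, where Python A recurses forever (RecursionError); it excludes no input on which A returns.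
def Pre_kasr_latki (n : Int) (s : Int) (Final_num : String) (mul_num : Int) : Prop := s ≤ n
instance (n : Int) (s : Int) (Final_num : String) (mul_num : Int) : Decidable (Pre_kasr_latki n s Final_num mul_num) := by unfold Pre_kasr_latki; infer_instance
def pvWitness_kasr_latki : Int × Int × String × Int := (4, 1, "", 1)

def Spec_kasr_latki (n : Int) (s : Int) (Final_num : String) (mul_num : Int) (out : String) : Prop := out = kasr_latki_alt n s Final_num mul_num
instance (n : Int) (s : Int) (Final_num : String) (mul_num : Int) (out : String) : Decidable (Spec_kasr_latki n s Final_num mul_num out) := by unfold Spec_kasr_latki; infer_instance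

-- ===== CLAIM (what is proved, stated in full; the proofs are below) =====
def Claim_equal_kasr_latki : Prop := ∀ (n : Int) (s : Int) (Final_num : String) (mul_num : Int), Dom_kasr_latki n s Final_num mul_num → Pre_kasr_latki n s Final_num mul_num → Spec_kasr_latki n s Final_num mul_num (kasr_latki n s Final_num mul_num)

-- ===== LEMMAS AND PROOFS =====
-- proof-side reference form: direct countdown recursion on the remaining depth
def kasrF : Nat → Int → String
  | 0, mul => PySem.Int.toStr mul
  | k + 1, mul =>
      PySem.Int.toStr mul ++ "+\\frac{" ++ kasrF k (2 * mul) ++ "}{" ++ kasrF k (2 * mul + 1) ++ "}"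

-- exact iteration cost of processing a node with remaining depth k
def kasrC : Nat → Nat
  | 0 => 1
  | k + 1 => 2 * kasrC k + 3

theorem kasrC_eq (k : Nat) : kasrC k + 3 = 2 ^ (k + 2) := by
  induction k with
  | zero => rfl
  | succ k ih =>
    have h2 : (2:Nat) ^ (k + 1 + 2) = 2 ^ (k + 2) * 2 := pow_succ 2 (k + 2)
    simp only [kasrC]
    omega

-- A's threaded accumulator equals prepending the reference string (fuel exact: s + k = n)
theorem kasrLoopA_eq (n : Int) (k : Nat) : ∀ (s : Int) (F : String) (m : Int), s + k = n →
    kasrLoopA n k s F m = F ++ kasrF k m := by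
  induction k with
  | zero =>
    intro s F m h
    simp only [kasrLoopA, kasrF]
    rw [if_pos (by omega)]
  | succ k ih =>
    intro s F m h
    rw [kasrLoopA, if_neg (by omega)]
    simp only [ih (s + 1) _ _ (by push_cast at h ⊢; omega), kasrF, String.append_assoc]

-- the stack machine processes one node in exactly kasrC k steps, appending the reference string
theorem kasrRun_node (n : Int) (k : Nat) :
    ∀ (fuel : Nat) (d m : Int) (rest : List (String ⊕ Int × Int)) (out : String), d + k = n →
    kasrRun n (kasrC k + fuel) (Sum.inr (d, m) :: rest) out = kasrRun n fuel rest (out ++ kasrF k m) := by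
  induction k with
  | zero =>
    intro fuel d m rest out h
    rw [show kasrC 0 + fuel = fuel + 1 from by simp [kasrC]; omega]
    rw [kasrRun, if_pos (by omega)]
    rfl
  | succ k ih =>
    intro fuel d m rest out h
    have hc : kasrC (k + 1) + fuel = (2 * kasrC k + 2 + fuel) + 1 := by simp [kasrC]; omega
    rw [hc, kasrRun, if_neg (by omega)]
    have h1 : 2 * kasrC k + 2 + fuel = kasrC k + (kasrC k + fuel + 2) := by omega
    rw [h1, ih _ _ _ _ _ (by push_cast at h ⊢; omega)]
    have h2 : kasrC k + fuel + 2 = (kasrC k + fuel + 1) + 1 := by omega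
    rw [h2, kasrRun]
    have h3 : kasrC k + fuel + 1 = kasrC k + (fuel + 1) := by omega
    rw [h3, ih _ _ _ _ _ (by push_cast at h ⊢; omega), kasrRun]
    simp [kasrF, String.append_assoc]

theorem kasrRun_nil (n : Int) (fuel : Nat) (out : String) : kasrRun n fuel [] out = out := by
  cases fuel <;> rfl

theorem kasr_latki_alt_eq (n s : Int) (F : String) (m : Int) (h : s ≤ n) :
    kasr_latki_alt n s F m = F ++ kasrF (n - s).toNat m := by
  have hk : s + ((n - s).toNat : Int) = n := by omega
  rw [kasr_latki_alt, ← kasrC_eq, kasrRun_node n _ _ _ _ _ _ hk, kasrRun_nil]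

-- ===== VERDICT (by name: the statement is the Claim_ definition above) =====
theorem kasr_latki_spec : Claim_equal_kasr_latki := by
  intro n s Final_num mul_num _ hpre
  have hs : s ≤ n := hpre
  show kasr_latki n s Final_num mul_num = kasr_latki_alt n s Final_num mul_num
  rw [kasr_latki, kasrLoopA_eq n _ s Final_num mul_num (by omega), kasr_latki_alt_eq n s _ _ hpre]
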